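-- pv_equiv track=rewrite | github.com/m1sterzer0/codejams | 2011/2/C.py | doPrimeSearch
-- ===== SOURCE A (Python) =====
-- import math
--
-- def sieve(limit) :
--     ll= limit+1
--     a = [True] * ll
--     a[0] = False
--     a[1] = False
--     a[2::2] = [False] * len(a[2::2])
--     yield 2
--     for i in range(3,ll,2) :
--         if not a[i] : continue
--         yield i
--         a[i*i::2*i] = [False] * len(a[i*i::2*i])
--
-- def doPrimeSearch(n) :
--     lim = int(math.sqrt(n))
--     if lim*lim > n : lim -= 1
--     if (lim+1)*(lim+1) <= n : lim += 1
--     tarr = []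
--     for p in sieve(lim) : ## A bit wasteful, as we are sieving every testcase, but given the parallelization, it is fine
--         x = p*p; cnt=1
--         while x <= n : cnt += 1; x *= p
--         tarr.append(cnt)
--     return tarr
-- ===== SOURCE B (Python) =====
-- import math
--
-- def doPrimeSearch(n):
--     lim = math.isqrt(n)
--     tarr = []
--     primes = []
--     for c in range(2, lim + 1):
--         if all(c % p != 0 for p in primes):
--             primes.append(c)
--             m = n
--             cnt = 0
--             while m >= c:
--                 m //= c
--                 cnt += 1
--             tarr.append(cnt)
--     return tarr
-- ===== Notes on version B (the rewrite author's own statement) =====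
-- stated objective: alternative
-- what changed: Replaces the sieve-of-Eratosthenes generator (boolean array with slice clearing) by trial-division prime enumeration against the primes found so far, replaces the float sqrt with its two corrective ifs by math.isqrt, and computes each exponent by repeated floor division of n instead of growing powers p^k.
-- intended difference: For 1 <= n <= 3 A returns [1] because its sieve yields 2 unconditionally even though there is no prime <= sqrt(n); B returns the intended empty list. — e.g. on doPrimeSearch(2): A returns [1], B returns []
-- outside the precondition, e.g. on doPrimeSearch(0): A raises IndexError, B returns []; on doPrimeSearch(-5): A raises ValueError, B raises ValueError
import Mathlib
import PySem

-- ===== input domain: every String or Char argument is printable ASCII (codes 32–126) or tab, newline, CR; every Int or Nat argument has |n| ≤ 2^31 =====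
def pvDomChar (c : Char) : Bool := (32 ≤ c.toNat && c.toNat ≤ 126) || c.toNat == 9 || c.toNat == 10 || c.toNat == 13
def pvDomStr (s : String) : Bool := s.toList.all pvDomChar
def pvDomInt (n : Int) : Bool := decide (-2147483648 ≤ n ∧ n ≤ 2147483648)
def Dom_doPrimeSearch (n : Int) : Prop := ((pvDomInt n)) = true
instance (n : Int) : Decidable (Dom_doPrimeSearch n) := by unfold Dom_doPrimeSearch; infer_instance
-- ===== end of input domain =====

-- B replaces A's sieve-of-Eratosthenes generator by trial-division prime enumeration (math.isqrt
-- instead of float sqrt + corrections; exponents by repeated floor division of n instead of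
-- growing powers); alternative algorithm of similar cost, not claimed faster.


-- ===== PORT A =====
-- a[s::k] = [False]*len(a[s::k]) : clears indices s, s+k, s+2k, ... (exact for k > 0, 0 <= s)
def pvClearSlice (a : List Bool) (s k : Nat) : List Bool :=
  (List.range (if s < a.length then (a.length - s + k - 1) / k else 0)).foldl
    (fun a m => a.set (s + m * k) false) a

-- A's generator `sieve`, collected into the list of yielded values; on every run A completes,
-- the reads a[i] and writes a[0], a[1] are in range, so List.set/List.getD are exact here.
def pvSieveA (lim : Int) : List Int :=
  let ll : Int := lim + 1
  let a : List Bool := ((List.replicate ll.toNat true).set 0 false).set 1 false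
  let a : List Bool := pvClearSlice a 2 2
  let st := (PySem.List.pyRange 3 ll 2).foldl
    (fun (st : List Int × List Bool) i =>
      if st.2.getD i.toNat false = false then st
      else (st.1 ++ [i], pvClearSlice st.2 (i.toNat * i.toNat) (2 * i.toNat)))
    ([(2 : Int)], a)
  st.1

-- x = p*p; cnt = 1; while x <= n: cnt += 1; x *= p   (fuel n.toNat+2 suffices: x at least doubles)
def pvCntA (n p : Int) : Nat → Int → Int → Int
  | 0, _, cnt => cnt
  | f + 1, x, cnt => if x ≤ n then pvCntA n p f (x * p) (cnt + 1) else cnt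

def doPrimeSearch (n : Int) : List Int :=
  -- int(math.sqrt(n)) : ported as Nat.sqrt; on the admitted inputs the two corrective ifs
  -- below make the Python value and this one coincide (both ifs are proved no-ops on Pre_)
  let lim0 : Int := (Nat.sqrt n.toNat : Int)
  let lim1 : Int := if lim0 * lim0 > n then lim0 - 1 else lim0
  let lim : Int := if (lim1 + 1) * (lim1 + 1) ≤ n then lim1 + 1 else lim1
  (pvSieveA lim).foldl (fun tarr p => tarr ++ [pvCntA n p (n.toNat + 2) (p * p) 1]) []

-- ===== PORT B =====
-- m = n; cnt = 0; while m >= c: m //= c; cnt += 1   (fuel n.toNat+2 suffices: m at least halves)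
def pvCntB (c : Int) : Nat → Int → Int → Int
  | 0, _, cnt => cnt
  | f + 1, m, cnt => if m ≥ c then pvCntB c f (PySem.Int.floordiv m c) (cnt + 1) else cnt

def doPrimeSearch_alt (n : Int) : List Int :=
  let lim : Int := (Nat.sqrt n.toNat : Int)   -- math.isqrt(n), exact for 0 ≤ n
  let st := (PySem.List.pyRange 2 (lim + 1) 1).foldl
    (fun (st : List Int × List Int) c =>
      if st.2.all (fun p => PySem.Int.mod c p != 0)
      then (st.1 ++ [pvCntB c (n.toNat + 2) n 0], st.2 ++ [c])
      else st)
    ([], [])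
  st.1

-- ===== PRECONDITION & SPEC =====
-- Pre_ excludes exactly n ≤ 0, where A raises: ValueError from math.sqrt for n < 0,
-- IndexError from a[1] in the sieve for n = 0.
def Pre_doPrimeSearch (n : Int) : Prop := 1 ≤ n
instance (n : Int) : Decidable (Pre_doPrimeSearch n) := by unfold Pre_doPrimeSearch; infer_instance
def pvWitness_doPrimeSearch : Int := 10

-- For 1 ≤ n ≤ 3 A returns [1] because its sieve yields 2 unconditionally even though there is
-- no prime ≤ √n; B returns the intended empty list.
def D_doPrimeSearch (n : Int) : Prop := 1 ≤ n ∧ n ≤ 3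
instance (n : Int) : Decidable (D_doPrimeSearch n) := by unfold D_doPrimeSearch; infer_instance

def Spec_doPrimeSearch (n : Int) (out : List Int) : Prop := ¬ D_doPrimeSearch n → out = doPrimeSearch_alt n
instance (n : Int) (out : List Int) : Decidable (Spec_doPrimeSearch n out) := by unfold Spec_doPrimeSearch; infer_instance

def pvDiffWitness_doPrimeSearch : Int := 2
def pvDiffWitnessOut_doPrimeSearch : (List Int) × (List Int) := ([1], [])

-- ===== CLAIM (what is proved, stated in full; the proofs are below) =====
def Claim_unchanged_doPrimeSearch : Prop := ∀ (n : Int), Dom_doPrimeSearch n → Pre_doPrimeSearch n → Spec_doPrimeSearch n (doPrimeSearch n)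
def Claim_changed_doPrimeSearch : Prop := Dom_doPrimeSearch (pvDiffWitness_doPrimeSearch) ∧ Pre_doPrimeSearch (pvDiffWitness_doPrimeSearch) ∧ D_doPrimeSearch (pvDiffWitness_doPrimeSearch) ∧ doPrimeSearch (pvDiffWitness_doPrimeSearch) = pvDiffWitnessOut_doPrimeSearch.1 ∧ doPrimeSearch_alt (pvDiffWitness_doPrimeSearch) = pvDiffWitnessOut_doPrimeSearch.2 ∧ pvDiffWitnessOut_doPrimeSearch.1 ≠ pvDiffWitnessOut_doPrimeSearch.2
def Claim_exact_doPrimeSearch : Prop := ∀ (n : Int), Dom_doPrimeSearch n → Pre_doPrimeSearch n → D_doPrimeSearch n → doPrimeSearch n ≠ doPrimeSearch_alt n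

-- ===== LEMMAS AND PROOFS =====
def pvPrimesBelow (m : Nat) : List Nat := (List.range m).filter (fun c => decide (Nat.Prime c))

theorem pv_prime_iff_no_smaller_prime_dvd (c : Nat) (hc : 2 ≤ c) :
    (∀ p, Nat.Prime p → p < c → ¬ p ∣ c) ↔ Nat.Prime c := by
  constructor
  · intro H
    by_contra hnc
    obtain ⟨q, hq, hqd⟩ := Nat.exists_prime_and_dvd (show c ≠ 1 by omega)
    have hqle : q ≤ c := Nat.le_of_dvd (by omega) hqd
    have hne : q ≠ c := fun h => hnc (h ▸ hq)
    exact H q hq (by omega) hqd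
  · intro hcp p hp hlt hdvd
    rcases (Nat.Prime.eq_one_or_self_of_dvd hcp p hdvd) with h | h
    · have := hp.two_le; omega
    · omega

theorem pv_cntB_go (p : Nat) (hp : 2 ≤ p) :
    ∀ (fuel m : Nat) (cnt : Int), Nat.log p m < fuel →
      pvCntB (p : Int) fuel (m : Int) cnt = cnt + (Nat.log p m : Int) := by
  intro fuel
  induction fuel with
  | zero => intro m cnt h; omega
  | succ f ih =>
    intro m cnt h
    show (if (m : Int) ≥ (p : Int) then pvCntB (p:Int) f (PySem.Int.floordiv (m:Int) (p:Int)) (cnt+1) else cnt) = _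
    by_cases hm : p ≤ m
    · rw [if_pos (by exact_mod_cast hm)]
      rw [show PySem.Int.floordiv (m:Int) (p:Int) = ((m / p : Nat) : Int) from PySem.Int.floordiv_natCast m p]
      have hpos : 0 < Nat.log p m := Nat.log_pos (by omega) hm
      have hdiv : Nat.log p (m / p) = Nat.log p m - 1 := Nat.log_div_base p m
      rw [ih (m / p) (cnt + 1) (by omega)]
      push_cast [hdiv]
      have : (1:Int) ≤ (Nat.log p m : Int) := by exact_mod_cast hpos
      omega
    · rw [if_neg (by exact_mod_cast hm)]
      have : Nat.log p m = 0 := by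
        rw [Nat.log_eq_zero_iff]; left; omega
      rw [this]; simp

theorem pv_cntB_eq (N p : Nat) (hp : 2 ≤ p) (hN : 1 ≤ N) :
    pvCntB (p : Int) (N + 2) (N : Int) 0 = (Nat.log p N : Int) := by
  rw [pv_cntB_go p hp (N + 2) N 0 (by have := Nat.log_le_self p N; omega)]
  simp

theorem pv_pow_le_iff (N p e : Nat) (hp : 2 ≤ p) (hN : 1 ≤ N) :
    (p ^ e ≤ N ↔ e ≤ Nat.log p N) :=
  Nat.pow_le_iff_le_log (by omega) (by omega)

theorem pv_cntA_go (N p : Nat) (hp : 2 ≤ p) (hN : 1 ≤ N) :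
    ∀ (fuel c : Nat), 1 ≤ c → c ≤ Nat.log p N → Nat.log p N - c < fuel →
      pvCntA (N : Int) (p : Int) fuel ((p ^ (c + 1) : Nat) : Int) (c : Int) = (Nat.log p N : Int) := by
  intro fuel
  induction fuel with
  | zero => intro c h1 h2 h3; omega
  | succ f ih =>
    intro c h1 h2 h3
    show (if ((p ^ (c+1) : Nat) : Int) ≤ (N : Int) then
        pvCntA (N:Int) (p:Int) f (((p ^ (c+1) : Nat) : Int) * (p:Int)) ((c:Int) + 1) else (c:Int)) = _
    by_cases hc : c = Nat.log p N
    · rw [if_neg]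
      · exact_mod_cast congrArg (Nat.cast (R := Int)) hc
      · have : N < p ^ (c + 1) := by
          rw [hc]; exact Nat.lt_pow_succ_log_self (by omega) N
        push_cast
        exact_mod_cast not_le.mpr (by exact_mod_cast this)
    · have hlt : c < Nat.log p N := by omega
      rw [if_pos (by exact_mod_cast (pv_pow_le_iff N p (c+1) hp hN).mpr (by omega))]
      have hx : ((p ^ (c+1) : Nat) : Int) * (p : Int) = ((p ^ (c + 2) : Nat) : Int) := by
        push_cast [pow_succ]; ring
      have hcnt : (c : Int) + 1 = ((c + 1 : Nat) : Int) := by push_cast; ring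
      rw [hx, hcnt]
      exact ih (c + 1) (by omega) (by omega) (by omega)

theorem pv_cntA_eq (N p : Nat) (hp : 2 ≤ p) (hpp : p * p ≤ N) :
    pvCntA (N : Int) (p : Int) (N + 2) ((p : Int) * (p : Int)) 1 = (Nat.log p N : Int) := by
  have hN : 1 ≤ N := by nlinarith
  have h2 : 2 ≤ Nat.log p N := (pv_pow_le_iff N p 2 hp hN).mp (by nlinarith [pow_two p])
  have hx : (p : Int) * (p : Int) = ((p ^ (1 + 1) : Nat) : Int) := by push_cast; ring
  have h1 : (1 : Int) = ((1 : Nat) : Int) := by norm_num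
  rw [hx, h1, pv_cntA_go N p hp hN (N + 2) 1 (by omega) (by omega)
    (by have := Nat.log_le_self p N; omega)]

theorem pv_foldl_append_map (l : List Int) (f : Int → Int) (init : List Int) :
    l.foldl (fun t p => t ++ [f p]) init = init ++ l.map f := by
  induction l generalizing init with
  | nil => simp
  | cons x xs ih => simp [List.foldl_cons, ih]

theorem pv_set_getD (l : List Bool) (i j : Nat) :
    (l.set i false).getD j false = if i = j then false else l.getD j false := by
  rw [List.getD_eq_getElem?_getD, List.getD_eq_getElem?_getD, List.getElem?_set]
  by_cases hij : i = j
  · rw [if_pos hij, if_pos hij]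
    split <;> rfl
  · rw [if_neg hij, if_neg hij]

theorem pv_foldl_set_length (l : List Nat) (a : List Bool) (f : Nat → Nat) :
    (l.foldl (fun a m => a.set (f m) false) a).length = a.length := by
  induction l generalizing a with
  | nil => rfl
  | cons x xs ih => simp [List.foldl_cons, ih]

theorem pv_foldl_set_getD (s k : Nat) : ∀ (cnt : Nat) (a : List Bool) (j : Nat),
    ((List.range cnt).foldl (fun a m => a.set (s + m * k) false) a).getD j false
      = if ∃ m, m < cnt ∧ j = s + m * k then false else a.getD j false := by
  intro cnt
  induction cnt with
  | zero => intro a j; simp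
  | succ c ih =>
    intro a j
    rw [List.range_succ, List.foldl_append, List.foldl_cons, List.foldl_nil, pv_set_getD, ih]
    by_cases h1 : s + c * k = j
    · rw [if_pos h1, if_pos ⟨c, by omega, h1.symm⟩]
    · rw [if_neg h1]
      by_cases h2 : ∃ m, m < c ∧ j = s + m * k
      · rw [if_pos h2, if_pos (by obtain ⟨m, hm, he⟩ := h2; exact ⟨m, by omega, he⟩)]
      · rw [if_neg h2, if_neg]
        rintro ⟨m, hm, he⟩
        rcases Nat.lt_succ_iff_lt_or_eq.mp hm with h | h
        · exact h2 ⟨m, h, he⟩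
        · rw [h] at he; exact h1 he.symm

theorem pv_clearSlice_length (a : List Bool) (s k : Nat) :
    (pvClearSlice a s k).length = a.length := by
  unfold pvClearSlice; exact pv_foldl_set_length _ _ _

theorem pv_cnt_iff (L s k m : Nat) (hk : 0 < k) (hs : s < L) :
    m < (L - s + k - 1) / k ↔ m * k < L - s := by
  rw [show m < (L - s + k - 1) / k ↔ m + 1 ≤ (L - s + k - 1) / k from Iff.rfl,
      Nat.le_div_iff_mul_le hk]
  have h : (m + 1) * k = m * k + k := by ring
  rw [h]
  omega

theorem pv_clearSlice_getD (a : List Bool) (s k : Nat) (hk : 0 < k) (j : Nat) :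
    (pvClearSlice a s k).getD j false
      = if s ≤ j ∧ j < a.length ∧ k ∣ (j - s) then false else a.getD j false := by
  unfold pvClearSlice
  rw [pv_foldl_set_getD]
  by_cases hj : j < a.length
  · by_cases hcond : s ≤ j ∧ j < a.length ∧ k ∣ (j - s)
    · rw [if_pos hcond, if_pos]
      obtain ⟨hs, _, m, hm⟩ := hcond
      have hm' : j - s = m * k := by rw [hm]; ring
      have hsl : s < a.length := by omega
      rw [if_pos hsl]
      exact ⟨m, (pv_cnt_iff a.length s k m hk hsl).mpr (by omega), by omega⟩
    · rw [if_neg hcond, if_neg]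
      rintro ⟨m, hm, he⟩
      exact hcond ⟨by omega, hj, ⟨m, by rw [he]; ring_nf; omega⟩⟩
  · have hfalse : a.getD j false = false := by
      rw [List.getD_eq_getElem?_getD, List.getElem?_eq_none (by omega)]; rfl
    rw [hfalse]
    split <;> split <;> rw [ite_self]

def pvOddPrimesBelow (m : Nat) : List Nat :=
  (List.range m).filter (fun c => decide (Nat.Prime c) && decide (c % 2 = 1))

def pvCondB (s t j : Nat) : Bool :=
  decide (3 ≤ j) && decide (j < s + 1) && decide (j % 2 = 1) &&
  (List.range (3 + 2 * t)).all (fun p => !(decide (Nat.Prime p) && decide (p ∣ j) && decide (p * p ≤ j)))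

def pvSieveFold (a0 : List Bool) (t : Nat) : List Int × List Bool :=
  ((List.range t).map (fun (k : Nat) => (3 : Int) + 2 * (k : Int))).foldl
    (fun (st : List Int × List Bool) i =>
      if st.2.getD i.toNat false = false then st
      else (st.1 ++ [i], pvClearSlice st.2 (i.toNat * i.toNat) (2 * i.toNat)))
    ([2], a0)


theorem pv_testB (c : Nat) (hc : 2 ≤ c) :
    ((pvPrimesBelow c).map (fun (p : Nat) => (p : Int))).all (fun p => PySem.Int.mod (c : Int) p != 0)
      = decide (Nat.Prime c) := by
  rw [Bool.eq_iff_iff, decide_eq_true_iff, ← pv_prime_iff_no_smaller_prime_dvd c hc]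
  rw [List.all_eq_true]
  constructor
  · intro H p hp hlt hdvd
    have hmem : ((p : Int)) ∈ (pvPrimesBelow c).map (fun (p : Nat) => (p : Int)) := by
      refine List.mem_map.mpr ⟨p, ?_, rfl⟩
      unfold pvPrimesBelow; rw [List.mem_filter, List.mem_range]; exact ⟨hlt, by simp [hp]⟩
    have h2 := H _ hmem
    rw [bne_iff_ne] at h2
    apply h2
    rw [show PySem.Int.mod (c:Int) (p:Int) = ((c % p : Nat) : Int) from PySem.Int.mod_natCast c p]
    exact_mod_cast congrArg (Nat.cast (R := Int)) (Nat.mod_eq_zero_of_dvd hdvd)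
  · intro H x hx
    obtain ⟨p, hmem, rfl⟩ := List.mem_map.mp hx
    unfold pvPrimesBelow at hmem; rw [List.mem_filter, List.mem_range] at hmem
    obtain ⟨hlt, hp⟩ := hmem
    rw [decide_eq_true_iff] at hp
    rw [bne_iff_ne]
    intro h0
    have hm : c % p = 0 := by
      rw [show PySem.Int.mod (c:Int) (p:Int) = ((c % p : Nat) : Int) from PySem.Int.mod_natCast c p] at h0
      exact_mod_cast h0
    exact H p hp hlt (Nat.dvd_iff_mod_eq_zero.mpr hm)

theorem pv_inv_altB (N : Nat) (hN : 1 ≤ N) : ∀ t : Nat,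
    (PySem.List.pyRange 2 ((2 + t : Nat) : Int) 1).foldl
      (fun (st : List Int × List Int) c =>
        if st.2.all (fun p => PySem.Int.mod c p != 0)
        then (st.1 ++ [pvCntB c (N + 2) (N : Int) 0], st.2 ++ [c])
        else st)
      ([], [])
    = ((pvPrimesBelow (2 + t)).map (fun p => (Nat.log p N : Int)),
       (pvPrimesBelow (2 + t)).map (fun (p : Nat) => (p : Int))) := by
  intro t
  induction t with
  | zero =>
    have h1 : PySem.List.pyRange 2 ((2:Nat) : Int) 1 = [] :=
      PySem.List.pyRange_one_eq_nil (by norm_num)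
    have h2 : pvPrimesBelow 2 = [] := by decide
    simp [h1, h2]
  | succ t ih =>
    have hb : ((2 + (t+1) : Nat) : Int) = ((2 + t : Nat) : Int) + 1 := by push_cast; ring
    rw [hb, PySem.List.pyRange_one_succ_right (by push_cast; omega), List.foldl_append]
    rw [ih]
    simp only [List.foldl_cons, List.foldl_nil]
    rw [pv_testB (2 + t) (by omega)]
    have hsplit : pvPrimesBelow (2 + (t+1)) =
        pvPrimesBelow (2 + t) ++ if Nat.Prime (2 + t) then [2 + t] else [] := by
      show pvPrimesBelow ((2 + t) + 1) = _
      unfold pvPrimesBelow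
      rw [List.range_succ, List.filter_append]
      simp only [List.filter_cons, List.filter_nil]
      split <;> simp_all
    by_cases hp : Nat.Prime (2 + t)
    · rw [if_pos (by simp [hp])]
      rw [pv_cntB_eq N (2 + t) (by omega) hN]
      simp [hsplit, hp]
    · rw [if_neg (by simp [hp])]
      simp [hsplit, hp]

theorem pvCondB_true_iff (s t j : Nat) :
    pvCondB s t j = true ↔
      (3 ≤ j ∧ j < s + 1 ∧ j % 2 = 1 ∧ ∀ p, p < 3 + 2 * t → Nat.Prime p → ¬(p ∣ j ∧ p * p ≤ j)) := by
  unfold pvCondB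
  simp [List.all_eq_true, List.mem_range, and_assoc]
  intro _ _ _
  constructor
  · intro h p hlt hp hd
    rcases h p hlt with (h' | h') | h'
    · exact absurd hp h'
    · exact absurd hd h'
    · exact h'
  · intro h p hlt
    by_cases hp : Nat.Prime p
    · by_cases hd : p ∣ j
      · exact Or.inr (h p hlt hp hd)
      · exact Or.inl (Or.inr hd)
    · exact Or.inl (Or.inl hp)

-- the sieve cell at the current candidate decides primality
theorem pv_condB_self (s t : Nat) (hc : 3 + 2 * t ≤ s) :
    pvCondB s t (3 + 2 * t) = decide (Nat.Prime (3 + 2 * t)) := by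
  set c := 3 + 2 * t with hcdef
  rw [Bool.eq_iff_iff, pvCondB_true_iff, decide_eq_true_iff]
  constructor
  · rintro ⟨h3, hlt, hodd, H⟩
    by_contra hnp
    have hq := Nat.minFac_prime (show c ≠ 1 by omega)
    have hqd : c.minFac ∣ c := Nat.minFac_dvd c
    have hq2 : c.minFac * c.minFac ≤ c := by
      have := Nat.minFac_sq_le_self (show 0 < c by omega) hnp
      rwa [pow_two] at this
    have hqlt : c.minFac < c := by nlinarith [hq.two_le]
    exact H c.minFac hqlt hq ⟨hqd, hq2⟩
  · intro hp
    refine ⟨by omega, by omega, ?_, ?_⟩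
    · rcases hp.eq_two_or_odd with h | h
      · omega
      · exact h
    · intro p hlt hpp ⟨hdvd, _⟩
      rcases hp.eq_one_or_self_of_dvd p hdvd with h | h
      · exact hpp.one_lt.ne' h
      · omega

theorem pv_condB_mono (s t j : Nat) (h : pvCondB s (t + 1) j = true) : pvCondB s t j = true := by
  rw [pvCondB_true_iff] at h ⊢
  exact ⟨h.1, h.2.1, h.2.2.1, fun p hp => h.2.2.2 p (by omega)⟩

-- clearing the odd multiples of the current prime updates the invariant
theorem pv_condB_clear (s t j : Nat) (hp : Nat.Prime (3 + 2 * t)) :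
    (if (3 + 2 * t) * (3 + 2 * t) ≤ j ∧ j < s + 1 ∧ 2 * (3 + 2 * t) ∣ (j - (3 + 2 * t) * (3 + 2 * t))
     then false else pvCondB s t j) = pvCondB s (t + 1) j := by
  set c := 3 + 2 * t with hcdef
  have hcodd : c % 2 = 1 := by omega
  cases hP : pvCondB s t j with
  | false =>
    have hQ : pvCondB s (t + 1) j = false := by
      cases hQ2 : pvCondB s (t + 1) j with
      | false => rfl
      | true => rw [pv_condB_mono s t j hQ2] at hP; exact absurd hP (by simp)
    rw [hQ, ite_self]
  | true =>
    rw [pvCondB_true_iff] at hP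
    obtain ⟨h3, hlt, hodd, H⟩ := hP
    by_cases hC : c * c ≤ j ∧ j < s + 1 ∧ 2 * c ∣ (j - c * c)
    · rw [if_pos hC]
      symm
      rw [← Bool.not_eq_true, pvCondB_true_iff]
      rintro ⟨-, -, -, H'⟩
      obtain ⟨hcc, -, hdd⟩ := hC
      have hcj : c ∣ j := by
        have h1 : c ∣ (j - c * c) := dvd_trans (dvd_mul_left c 2) hdd
        have h2 : (j - c * c) + c * c = j := by omega
        calc c ∣ (j - c * c) + c * c := Nat.dvd_add h1 (dvd_mul_right c c)
        _ = j := h2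
      exact H' c (by omega) hp ⟨hcj, hcc⟩
    · rw [if_neg hC]
      symm
      rw [pvCondB_true_iff]
      refine ⟨h3, hlt, hodd, ?_⟩
      intro p hplt hpp ⟨hpd, hpsq⟩
      rcases Nat.lt_or_ge p c with hl | hg
      · exact H p hl hpp ⟨hpd, hpsq⟩
      · -- p ∈ {c, c+1}; c+1 is even hence not prime, so p = c
        have hpc : p = c := by
          rcases Nat.lt_or_ge p (c + 1) with h | h
          · omega
          · have hpeq : p = c + 1 := by omega
            rcases hpp.eq_two_or_odd with h2 | hoddp
            · omega
            · omega
        subst hpc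
        -- then j would have been cleared: c ∣ j, c*c ≤ j and j odd imply the slice hits j
        apply hC
        refine ⟨hpsq, hlt, ?_⟩
        obtain ⟨d, hd⟩ := hpd
        have hdc : c ≤ d := by
          by_contra hdc
          have : c * d < c * c := (Nat.mul_lt_mul_left (by omega : 0 < c)).mpr (by omega)
          omega
        obtain ⟨f, hf⟩ := Nat.le.dest hdc
        have hj : j = c * c + c * f := by rw [hd, ← hf]; ring
        have hdodd : d % 2 = 1 := by
          have hmm : j % 2 = (c % 2) * (d % 2) % 2 := by rw [hd, Nat.mul_mod]
          rw [hcodd, hodd] at hmm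
          omega
        have hfeven : f % 2 = 0 := by omega
        obtain ⟨g, hg⟩ : ∃ g, f = 2 * g := ⟨f / 2, by omega⟩
        refine ⟨g, ?_⟩
        have h1 : j - c * c = c * f := by omega
        rw [h1, hg]
        ring

theorem pv_condB_skip (s t j : Nat) (hnp : ¬ Nat.Prime (3 + 2 * t)) :
    pvCondB s (t + 1) j = pvCondB s t j := by
  rw [Bool.eq_iff_iff, pvCondB_true_iff, pvCondB_true_iff]
  constructor
  · rintro ⟨a, b, codd, H⟩
    exact ⟨a, b, codd, fun p hp => H p (by omega)⟩
  · rintro ⟨a, b, codd, H⟩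
    refine ⟨a, b, codd, ?_⟩
    intro p hplt hpp hpd
    rcases Nat.lt_or_ge p (3 + 2 * t) with h | h
    · exact H p h hpp hpd
    · have hpe : p = 3 + 2 * t ∨ p = 3 + 2 * t + 1 := by omega
      rcases hpe with h2 | h2
      · rw [h2] at hpp; exact hnp hpp
      · rcases hpp.eq_two_or_odd with h3 | h3 <;> omega

theorem pv_oddPB_prime (c : Nat) (hodd : c % 2 = 1) (hp : Nat.Prime c) :
    pvOddPrimesBelow (c + 2) = pvOddPrimesBelow c ++ [c] := by
  unfold pvOddPrimesBelow
  rw [show c + 2 = (c + 1) + 1 from rfl, List.range_succ, List.range_succ,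
      List.filter_append, List.filter_append]
  have h1 : (c + 1) % 2 = 0 := by omega
  simp [hp, hodd, h1]

theorem pv_oddPB_skip (c : Nat) (hodd : c % 2 = 1) (hnp : ¬ Nat.Prime c) :
    pvOddPrimesBelow (c + 2) = pvOddPrimesBelow c := by
  unfold pvOddPrimesBelow
  rw [show c + 2 = (c + 1) + 1 from rfl, List.range_succ, List.range_succ,
      List.filter_append, List.filter_append]
  have h1 : (c + 1) % 2 = 0 := by omega
  simp [hnp, h1]

theorem pv_sieve_inv (s : Nat) (a0 : List Bool) (ha0len : a0.length = s + 1)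
    (ha0 : ∀ j, a0.getD j false = pvCondB s 0 j) :
    ∀ t, 3 + 2 * t ≤ s + 2 →
      (pvSieveFold a0 t).1
          = (2 : Int) :: (pvOddPrimesBelow (3 + 2 * t)).map (fun (p : Nat) => (p : Int))
        ∧ (pvSieveFold a0 t).2.length = s + 1
        ∧ ∀ j, (pvSieveFold a0 t).2.getD j false = pvCondB s t j := by
  intro t
  induction t with
  | zero =>
    intro _
    refine ⟨?_, ha0len, ha0⟩
    have h3 : pvOddPrimesBelow 3 = [] := by decide
    simp [pvSieveFold, h3]
  | succ t ih =>
    intro hts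
    obtain ⟨ihp, ihlen, iha⟩ := ih (by omega)
    have hfold : pvSieveFold a0 (t + 1)
        = (if (pvSieveFold a0 t).2.getD ((3 : Int) + 2 * (t : Int)).toNat false = false
           then pvSieveFold a0 t
           else ((pvSieveFold a0 t).1 ++ [(3 : Int) + 2 * (t : Int)],
                 pvClearSlice (pvSieveFold a0 t).2
                   (((3 : Int) + 2 * (t : Int)).toNat * ((3 : Int) + 2 * (t : Int)).toNat)
                   (2 * ((3 : Int) + 2 * (t : Int)).toNat))) := by
      unfold pvSieveFold
      rw [List.range_succ, List.map_append, List.foldl_append]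
      rfl
    have hcn : ((3 : Int) + 2 * (t : Int)).toNat = 3 + 2 * t := by omega
    have hread : (pvSieveFold a0 t).2.getD (((3 : Int) + 2 * (t : Int)).toNat) false
        = decide (Nat.Prime (3 + 2 * t)) := by
      rw [hcn, iha (3 + 2 * t), pv_condB_self s t (by omega)]
    by_cases hp : Nat.Prime (3 + 2 * t)
    · rw [hfold, hread, if_neg (by simp [hp])]
      refine ⟨?_, ?_, ?_⟩
      · show (pvSieveFold a0 t).1 ++ [(3 : Int) + 2 * (t : Int)] = _
        rw [ihp]
        rw [show 3 + 2 * (t + 1) = (3 + 2 * t) + 2 from by omega,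
            pv_oddPB_prime (3 + 2 * t) (by omega) hp]
        have hcast : (3 : Int) + 2 * (t : Int) = ((3 + 2 * t : Nat) : Int) := by push_cast; ring
        rw [hcast, List.map_append, List.map_cons, List.map_nil, List.cons_append]
      · show (pvClearSlice _ _ _).length = s + 1
        rw [pv_clearSlice_length]; exact ihlen
      · intro j
        show (pvClearSlice (pvSieveFold a0 t).2 _ _).getD j false = _
        rw [hcn, pv_clearSlice_getD _ _ _ (by omega) j, ihlen]
        rw [iha j]
        exact pv_condB_clear s t j hp
    · rw [hfold, hread, if_pos (by simp [hp])]
      refine ⟨?_, ihlen, ?_⟩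
      · rw [ihp, show 3 + 2 * (t + 1) = (3 + 2 * t) + 2 from by omega,
            pv_oddPB_skip (3 + 2 * t) (by omega) hp]
      · intro j
        rw [iha j]
        exact (pv_condB_skip s t j hp).symm

theorem pv_replicate_getD (n j : Nat) :
    (List.replicate n true).getD j false = decide (j < n) := by
  rw [List.getD_eq_getElem?_getD, List.getElem?_replicate]
  by_cases h : j < n <;> simp [h]

theorem pv_init_getD (s j : Nat) (hs : 2 ≤ s) :
    (pvClearSlice (((List.replicate (s + 1) true).set 0 false).set 1 false) 2 2).getD j false
      = pvCondB s 0 j := by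
  have hlen : (((List.replicate (s + 1) true).set 0 false).set 1 false).length = s + 1 := by
    simp
  rw [pv_clearSlice_getD _ _ _ (by omega) j, hlen, pv_set_getD, pv_set_getD, pv_replicate_getD]
  by_cases h1 : 2 ≤ j ∧ j < s + 1 ∧ 2 ∣ (j - 2)
  · rw [if_pos h1]; symm; rw [← Bool.not_eq_true, pvCondB_true_iff]
    rintro ⟨-, -, hodd, -⟩; omega
  · rw [if_neg h1]
    by_cases h2 : (1 : Nat) = j
    · rw [if_pos h2]; symm; rw [← Bool.not_eq_true, pvCondB_true_iff]
      rintro ⟨hj3, -, -, -⟩; omega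
    · rw [if_neg h2]
      by_cases h3 : (0 : Nat) = j
      · rw [if_pos h3]; symm; rw [← Bool.not_eq_true, pvCondB_true_iff]
        rintro ⟨hj3, -, -, -⟩; omega
      · rw [if_neg h3, Bool.eq_iff_iff, decide_eq_true_iff, pvCondB_true_iff]
        constructor
        · intro hj
          have hodd : j % 2 = 1 := by omega
          refine ⟨by omega, hj, hodd, ?_⟩
          intro p hp hpp hand
          obtain ⟨hpd, hpsq⟩ := hand
          have hp2 : p = 2 := by have := hpp.two_le; omega
          subst hp2
          omega
        · rintro ⟨-, hj, -, -⟩; exact hj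

theorem pv_primesBelow_cons (m : Nat) (hm : 3 ≤ m) :
    pvPrimesBelow m = 2 :: pvOddPrimesBelow m := by
  induction m, hm using Nat.le_induction with
  | base => decide
  | succ m hm ih =>
    unfold pvPrimesBelow pvOddPrimesBelow at *
    rw [List.range_succ, List.filter_append, List.filter_append, ih]
    have hcond : (decide (Nat.Prime m) && decide (m % 2 = 1)) = decide (Nat.Prime m) := by
      by_cases hp : Nat.Prime m
      · have hodd : m % 2 = 1 := by
          rcases hp.eq_two_or_odd with h | h
          · omega
          · exact h
        simp [hp, hodd]
      · simp [hp]
    rw [List.cons_append]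
    congr 2
    simp [List.filter, hcond]

theorem pv_oddPB_top (s : Nat) (hs : 2 ≤ s) :
    pvOddPrimesBelow (3 + 2 * ((s - 1) / 2)) = pvOddPrimesBelow (s + 1) := by
  by_cases h : s % 2 = 0
  · rw [show 3 + 2 * ((s - 1) / 2) = s + 1 from by omega]
  · rw [show 3 + 2 * ((s - 1) / 2) = (s + 1) + 1 from by omega]
    unfold pvOddPrimesBelow
    rw [List.range_succ, List.filter_append]
    have he : (s + 1) % 2 = 0 := by omega
    simp [he]

theorem pv_sieveA_eq (s : Nat) (hs : 2 ≤ s) :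
    pvSieveA (s : Int) = (pvPrimesBelow (s + 1)).map (fun (p : Nat) => (p : Int)) := by
  have hll : ((s : Int) + 1).toNat = s + 1 := by omega
  have hrange : PySem.List.pyRange 3 ((s : Int) + 1) 2
      = (List.range ((s - 1) / 2)).map (fun (k : Nat) => (3 : Int) + 2 * (k : Int)) := by
    rw [PySem.List.pyRange_of_pos 3 ((s : Int) + 1) (by norm_num)]
    congr 1
    by_cases h : (3 : Int) < (s : Int) + 1
    · rw [if_pos h]
      have : ((s : Int) + 1 - 3 + 2 - 1) = ((s - 1 : Nat) : Int) := by push_cast; omega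
      rw [this, show ((2:Int)) = ((2 : Nat) : Int) from rfl, ← Int.natCast_div]
      rw [Int.toNat_natCast]
    · rw [if_neg h]
      have hs2 : s = 2 := by omega
      subst hs2
      decide
  show ((PySem.List.pyRange 3 ((s : Int) + 1) 2).foldl
      (fun (st : List Int × List Bool) i =>
        if st.2.getD i.toNat false = false then st
        else (st.1 ++ [i], pvClearSlice st.2 (i.toNat * i.toNat) (2 * i.toNat)))
      ([(2 : Int)],
        pvClearSlice (((List.replicate ((s : Int) + 1).toNat true).set 0 false).set 1 false) 2 2)).1
    = _
  rw [hll, hrange]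
  have hinv := pv_sieve_inv s
    (pvClearSlice (((List.replicate (s + 1) true).set 0 false).set 1 false) 2 2)
    (by rw [pv_clearSlice_length]; simp)
    (fun j => pv_init_getD s j hs)
    ((s - 1) / 2) (by omega)
  show (pvSieveFold _ ((s - 1) / 2)).1 = _
  rw [hinv.1, pv_oddPB_top s hs, pv_primesBelow_cons (s + 1) (by omega)]
  simp

theorem pv_sqrt_ge_two (N : Nat) (h : 4 ≤ N) : 2 ≤ Nat.sqrt N := by
  have h2 : Nat.sqrt 4 ≤ Nat.sqrt N := Nat.sqrt_le_sqrt h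
  have h4 : Nat.sqrt 4 = 2 := by norm_num
  omega

theorem pv_altB_eq (n : Int) (hn : 4 ≤ n) :
    doPrimeSearch_alt n
      = (pvPrimesBelow (Nat.sqrt n.toNat + 1)).map (fun (p : Nat) => (Nat.log p n.toNat : Int)) := by
  obtain ⟨N, rfl⟩ : ∃ N : Nat, n = (N : Int) := ⟨n.toNat, (Int.toNat_of_nonneg (by omega)).symm⟩
  have hN4 : 4 ≤ N := by exact_mod_cast hn
  have hs2 : 2 ≤ Nat.sqrt N := pv_sqrt_ge_two N hN4
  show ((PySem.List.pyRange 2 ((Nat.sqrt ((N : Int)).toNat : Int) + 1) 1).foldl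
      (fun (st : List Int × List Int) c =>
        if st.2.all (fun p => PySem.Int.mod c p != 0)
        then (st.1 ++ [pvCntB c (((N : Int)).toNat + 2) (N : Int) 0], st.2 ++ [c])
        else st)
      ([], [])).1 = _
  rw [show ((N : Int)).toNat = N from Int.toNat_natCast N]
  rw [show (Nat.sqrt N : Int) + 1 = ((2 + (Nat.sqrt N - 1) : Nat) : Int) from by push_cast; omega]
  rw [pv_inv_altB N (by omega) (Nat.sqrt N - 1)]
  rw [show 2 + (Nat.sqrt N - 1) = Nat.sqrt N + 1 from by omega]

theorem pv_A_eq (n : Int) (hn : 4 ≤ n) :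
    doPrimeSearch n
      = (pvPrimesBelow (Nat.sqrt n.toNat + 1)).map (fun (p : Nat) => (Nat.log p n.toNat : Int)) := by
  obtain ⟨N, rfl⟩ : ∃ N : Nat, n = (N : Int) := ⟨n.toNat, (Int.toNat_of_nonneg (by omega)).symm⟩
  have hN4 : 4 ≤ N := by exact_mod_cast hn
  have hs2 : 2 ≤ Nat.sqrt N := pv_sqrt_ge_two N hN4
  have hsq : Nat.sqrt N * Nat.sqrt N ≤ N := by
    have h := Nat.sqrt_le' N
    rwa [pow_two] at h
  have hif1 : ¬ ((Nat.sqrt ((N : Int)).toNat : Int) * (Nat.sqrt ((N : Int)).toNat : Int) > (N : Int)) := by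
    rw [show ((N : Int)).toNat = N from Int.toNat_natCast N]
    push_cast
    exact_mod_cast not_lt.mpr (by exact_mod_cast hsq)
  have hif2 : ¬ (((Nat.sqrt ((N : Int)).toNat : Int) + 1) * ((Nat.sqrt ((N : Int)).toNat : Int) + 1) ≤ (N : Int)) := by
    rw [show ((N : Int)).toNat = N from Int.toNat_natCast N]
    have h := Nat.lt_succ_sqrt N
    rw [Nat.succ_eq_add_one] at h
    intro hc
    have h2 : ((Nat.sqrt N + 1) * (Nat.sqrt N + 1) : Nat) ≤ N := by exact_mod_cast (by push_cast at hc ⊢; linarith)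
    omega
  show ((pvSieveA (if ((if (Nat.sqrt ((N : Int)).toNat : Int) * (Nat.sqrt ((N : Int)).toNat : Int) > (N : Int)
          then (Nat.sqrt ((N : Int)).toNat : Int) - 1 else (Nat.sqrt ((N : Int)).toNat : Int)) + 1)
          * ((if (Nat.sqrt ((N : Int)).toNat : Int) * (Nat.sqrt ((N : Int)).toNat : Int) > (N : Int)
          then (Nat.sqrt ((N : Int)).toNat : Int) - 1 else (Nat.sqrt ((N : Int)).toNat : Int)) + 1) ≤ (N : Int)
        then (if (Nat.sqrt ((N : Int)).toNat : Int) * (Nat.sqrt ((N : Int)).toNat : Int) > (N : Int)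
          then (Nat.sqrt ((N : Int)).toNat : Int) - 1 else (Nat.sqrt ((N : Int)).toNat : Int)) + 1
        else (if (Nat.sqrt ((N : Int)).toNat : Int) * (Nat.sqrt ((N : Int)).toNat : Int) > (N : Int)
          then (Nat.sqrt ((N : Int)).toNat : Int) - 1 else (Nat.sqrt ((N : Int)).toNat : Int)))).foldl
      (fun tarr p => tarr ++ [pvCntA (N : Int) p (((N : Int)).toNat + 2) (p * p) 1]) []) = _
  rw [if_neg hif1, if_neg hif2]
  rw [show ((N : Int)).toNat = N from Int.toNat_natCast N]
  rw [pv_sieveA_eq (Nat.sqrt N) hs2, pv_foldl_append_map, List.map_map]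
  rw [List.nil_append]
  apply List.map_congr_left
  intro p hp
  have hmem : p < Nat.sqrt N + 1 ∧ Nat.Prime p := by
    unfold pvPrimesBelow at hp
    rw [List.mem_filter, List.mem_range] at hp
    exact ⟨hp.1, by simpa using hp.2⟩
  have hppN : p * p ≤ N :=
    le_trans (Nat.mul_le_mul (by omega) (by omega)) hsq
  exact pv_cntA_eq N p hmem.2.two_le hppN


theorem pv_eval_A1 : doPrimeSearch 1 = [1] := by
  have h : Nat.sqrt ((1:Int).toNat) = 1 := by rw [show (1:Int).toNat = 1 from rfl]; norm_num
  unfold doPrimeSearch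
  rw [h]
  decide

theorem pv_eval_A2 : doPrimeSearch 2 = [1] := by
  have h : Nat.sqrt ((2:Int).toNat) = 1 := by rw [show (2:Int).toNat = 2 from rfl]; norm_num
  unfold doPrimeSearch
  rw [h]
  decide

theorem pv_eval_A3 : doPrimeSearch 3 = [1] := by
  have h : Nat.sqrt ((3:Int).toNat) = 1 := by rw [show (3:Int).toNat = 3 from rfl]; norm_num
  unfold doPrimeSearch
  rw [h]
  decide

theorem pv_eval_B1 : doPrimeSearch_alt 1 = [] := by
  have h : Nat.sqrt ((1:Int).toNat) = 1 := by rw [show (1:Int).toNat = 1 from rfl]; norm_num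
  unfold doPrimeSearch_alt
  rw [h]
  decide

theorem pv_eval_B2 : doPrimeSearch_alt 2 = [] := by
  have h : Nat.sqrt ((2:Int).toNat) = 1 := by rw [show (2:Int).toNat = 2 from rfl]; norm_num
  unfold doPrimeSearch_alt
  rw [h]
  decide

theorem pv_eval_B3 : doPrimeSearch_alt 3 = [] := by
  have h : Nat.sqrt ((3:Int).toNat) = 1 := by rw [show (3:Int).toNat = 3 from rfl]; norm_num
  unfold doPrimeSearch_alt
  rw [h]
  decide

-- ===== VERDICT =====
theorem doPrimeSearch_spec : Claim_unchanged_doPrimeSearch := by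
  intro n _ hpre hD
  have h1 : (1 : Int) ≤ n := hpre
  have h4 : 4 ≤ n := by
    by_contra h
    exact hD ⟨h1, by omega⟩
  rw [pv_A_eq n h4, pv_altB_eq n h4]

theorem doPrimeSearch_changed : Claim_changed_doPrimeSearch := by
  unfold Claim_changed_doPrimeSearch
  exact ⟨by decide, by decide, by decide, pv_eval_A2, pv_eval_B2, by decide⟩

theorem doPrimeSearch_tight : Claim_exact_doPrimeSearch := by
  intro n _ _ hD
  obtain ⟨ha, hb⟩ := hD
  have h : n = 1 ∨ n = 2 ∨ n = 3 := by omega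
  rcases h with h | h | h <;> subst h
  · rw [pv_eval_A1, pv_eval_B1]; simp
  · rw [pv_eval_A2, pv_eval_B2]; simp
  · rw [pv_eval_A3, pv_eval_B3]; simp
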